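-- pv_equiv track=rewrite | github.com/Gyeol0/Algorithm | 백준12907번.py | animal
-- ===== SOURCE A (Python) =====
-- def animal(N, arr):
--     '''
--     토끼와 고양이 둘 중 하나
--     무조건 0부터 연속된 숫자가 있어야함
--     한 번에 모두 지워지면 고양이나 토끼 둘 중 하나만
--
--     두 번 지웠는데 남아 있으면 불가능 0
--     토끼와 고양이 수가 같으면 2 ** 마리 수
--     다르면 (2 ** 작은 마리 수) * 2
--
--     '''
--     max_arr = max(arr)
--     for i in range(max_arr + 1):
--         if i not in arr:
--             return 0
--         arr.remove(i)
--     # 토끼나 고양이 둘 중 하나만 있음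
--     if not arr:
--         return 2
--     max_arr2 = max(arr)
--     for i in range(max_arr2 + 1):
--         if i not in arr:
--             return 0
--         arr.remove(i)
--     if arr:
--         return 0
--     if max_arr > max_arr2:
--         return (2 ** (max_arr2 + 1)) * 2
--     else:
--         return (2 ** (max_arr2 + 1))
-- ===== SOURCE B (Python) =====
-- def animal(N, arr):
--     # Frequency-dict re-implementation: one counting pass plus one scan over 0..max
--     # with a prefix-of-2s check and a total-length check; no list mutation (A mutates arr).
--     cnt = {}
--     for x in arr:
--         cnt[x] = cnt.get(x, 0) + 1
--     m = max(arr)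
--     if m < 0:
--         return 0
--     t = -1
--     run = True
--     for i in range(m + 1):
--         c = cnt.get(i, 0)
--         if c == 0 or c > 2:
--             return 0
--         if c == 2:
--             if not run:
--                 return 0
--             t = i
--         else:
--             run = False
--     if len(arr) != (m + 1) + (t + 1):
--         return 0
--     if t == -1:
--         return 2
--     if t == m:
--         return 2 ** (t + 1)
--     return 2 ** (t + 1) * 2
-- ===== Notes on version B (the rewrite author's own statement) =====
-- stated objective: alternative
-- what changed: Replaces A's two destructive passes (repeated 'i in arr' membership scans and list.remove over range(max)) by a single frequency-dict build plus one scan over 0..max that checks the counts are a prefix of 2s followed by 1s and a total-length check; B does not mutate the argument list.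
import Mathlib
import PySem

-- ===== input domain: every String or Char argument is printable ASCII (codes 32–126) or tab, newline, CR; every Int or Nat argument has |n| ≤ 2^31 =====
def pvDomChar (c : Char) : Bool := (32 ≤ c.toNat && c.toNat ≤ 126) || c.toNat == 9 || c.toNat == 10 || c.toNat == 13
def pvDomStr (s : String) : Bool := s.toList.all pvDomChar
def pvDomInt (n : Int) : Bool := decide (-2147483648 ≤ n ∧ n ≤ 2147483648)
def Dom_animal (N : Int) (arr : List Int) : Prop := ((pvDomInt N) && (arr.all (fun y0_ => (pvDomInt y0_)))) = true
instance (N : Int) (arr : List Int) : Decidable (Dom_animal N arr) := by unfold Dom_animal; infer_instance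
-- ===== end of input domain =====

-- B replaces A's two destructive remove/membership passes by a frequency dict plus one
-- scan over 0..max (A mutates its list argument in place; B does not — the equivalence
-- proved here is about the return value).

-- ===== PORT A =====
-- 'for i in range(k): if i not in arr: return 0; arr.remove(i)' — none = the early 'return 0'
def animalScan (i b : Int) (arr : List Int) : Option (List Int) :=
  if _h : i < b then
    if i ∈ arr then
      match PySem.List.remove? arr i with
      | some arr' => animalScan (i + 1) b arr'
      | none => none            -- unreachable: i ∈ arr
    else none
  else some arr
  termination_by (b - i).toNat
  decreasing_by omega

def animal (N : Int) (arr : List Int) : Int :=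
  match PySem.List.max? arr (fun x => x) with
  | none => 0                   -- max([]) raises ValueError; excluded by Pre_animal
  | some max_arr =>
    match animalScan 0 (max_arr + 1) arr with
    | none => 0
    | some arr2 =>
      if arr2 = [] then 2
      else
        match PySem.List.max? arr2 (fun x => x) with
        | none => 0             -- unreachable: arr2 ≠ []
        | some max_arr2 =>
          match animalScan 0 (max_arr2 + 1) arr2 with
          | none => 0
          | some arr3 =>
            if arr3 ≠ [] then 0
            else if max_arr > max_arr2 then 2 ^ (max_arr2 + 1).toNat * 2
            else 2 ^ (max_arr2 + 1).toNat
            -- exponent max_arr2 + 1 ≥ 0 whenever this branch is reached, so toNat is exact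

-- ===== PORT B =====
-- the 'for i in range(m+1)' loop of Source B; state (t, run); none = the early 'return 0'
def altScan (i b : Int) (cnt : PySem.Dict Int Int) (t : Int) (run : Bool) : Option Int :=
  if _h : i < b then
    let c := cnt.getD i 0
    if c = 0 ∨ 2 < c then none
    else if c = 2 then
      if run = false then none else altScan (i + 1) b cnt i run
    else altScan (i + 1) b cnt t false
  else some t
  termination_by (b - i).toNat
  decreasing_by all_goals omega

def animal_alt (N : Int) (arr : List Int) : Int :=
  let cnt := arr.foldl (fun d x => d.insert x (d.getD x 0 + 1)) PySem.Dict.empty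
  match PySem.List.max? arr (fun x => x) with
  | none => 0                   -- max([]) raises ValueError; excluded by Pre_animal
  | some m =>
    if m < 0 then 0
    else
      match altScan 0 (m + 1) cnt (-1) true with
      | none => 0
      | some t =>
        if (arr.length : Int) ≠ (m + 1) + (t + 1) then 0
        else if t = -1 then 2
        else if t = m then 2 ^ (t + 1).toNat
        else 2 ^ (t + 1).toNat * 2

-- ===== PRECONDITION & SPEC =====
-- Pre_ excludes only the empty list, on which A raises ValueError (max of empty sequence).
def Pre_animal (N : Int) (arr : List Int) : Prop := arr ≠ []
instance (N : Int) (arr : List Int) : Decidable (Pre_animal N arr) := by unfold Pre_animal; infer_instance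
def pvWitness_animal : Int × List Int := (4, [0, 1, 2, 0, 1])

def Spec_animal (N : Int) (arr : List Int) (out : Int) : Prop := out = animal_alt N arr
instance (N : Int) (arr : List Int) (out : Int) : Decidable (Spec_animal N arr out) := by unfold Spec_animal; infer_instance

-- ===== CLAIM (what is proved, stated in full; the proofs are below) =====
def Claim_equal_animal : Prop := ∀ (N : Int) (arr : List Int), Dom_animal N arr → Pre_animal N arr → Spec_animal N arr (animal N arr)

-- ===== LEMMAS AND PROOFS =====

-- the multiset shape both programs recognise: counts are 2 on [0, t], 1 on (t, m], 0 elsewhere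
def Good (arr : List Int) (m t : Int) : Prop :=
  -1 ≤ t ∧ t ≤ m ∧
  (∀ i : Int, 0 ≤ i → i ≤ t → arr.count i = 2) ∧
  (∀ i : Int, t < i → i ≤ m → arr.count i = 1) ∧
  (∀ i : Int, i < 0 → arr.count i = 0) ∧
  (∀ i : Int, m < i → arr.count i = 0)

-- the common return value on a Good multiset
def valOf (m t : Int) : Int :=
  if t = -1 then 2 else if t = m then 2 ^ (t + 1).toNat else 2 ^ (t + 1).toNat * 2


-- list-based images of the two loops (proof helpers; the ports recurse on the bound)
def scanAList (rng : List Int) (arr : List Int) : Option (List Int) :=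
  match rng with
  | [] => some arr
  | i :: rest =>
    if i ∈ arr then
      match PySem.List.remove? arr i with
      | some arr' => scanAList rest arr'
      | none => none
    else none

def altScanL (rng : List Int) (cnt : PySem.Dict Int Int) (t : Int) (run : Bool) : Option Int :=
  match rng with
  | [] => some t
  | i :: rest =>
    let c := cnt.getD i 0
    if c = 0 ∨ 2 < c then none
    else if c = 2 then
      if run = false then none else altScanL rest cnt i run
    else altScanL rest cnt t false

lemma animalScan_eq_list_aux : ∀ (n : Nat) (i b : Int), (b - i).toNat ≤ n → ∀ arr,
    animalScan i b arr = scanAList (PySem.List.pyRange i b 1) arr := by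
  intro n
  induction n with
  | zero =>
    intro i b hn arr
    rw [animalScan, dif_neg (by omega), PySem.List.pyRange_one_eq_nil (by omega)]
    rfl
  | succ n ihn =>
    intro i b hn arr
    by_cases h : i < b
    · rw [animalScan, dif_pos h, PySem.List.pyRange_one_cons h]
      simp only [scanAList]
      by_cases hi : i ∈ arr
      · rw [if_pos hi, if_pos hi, PySem.List.remove?_eq_some_erase arr i hi]
        exact ihn (i + 1) b (by omega) _
      · rw [if_neg hi, if_neg hi]
    · rw [animalScan, dif_neg h, PySem.List.pyRange_one_eq_nil (by omega)]
      rfl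

lemma animalScan_eq_list (i b : Int) (arr : List Int) :
    animalScan i b arr = scanAList (PySem.List.pyRange i b 1) arr :=
  animalScan_eq_list_aux (b - i).toNat i b le_rfl arr

lemma altScan_eq_list_aux : ∀ (n : Nat) (i b : Int), (b - i).toNat ≤ n →
    ∀ (cnt : PySem.Dict Int Int) (t : Int) (run : Bool),
    altScan i b cnt t run = altScanL (PySem.List.pyRange i b 1) cnt t run := by
  intro n
  induction n with
  | zero =>
    intro i b hn cnt t run
    rw [altScan, dif_neg (by omega), PySem.List.pyRange_one_eq_nil (by omega)]
    rfl
  | succ n ihn =>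
    intro i b hn cnt t run
    by_cases h : i < b
    · rw [altScan, dif_pos h, PySem.List.pyRange_one_cons h]
      simp only [altScanL]
      by_cases h1 : cnt.getD i 0 = 0 ∨ 2 < cnt.getD i 0
      · rw [if_pos h1, if_pos h1]
      · rw [if_neg h1, if_neg h1]
        by_cases h2 : cnt.getD i 0 = 2
        · rw [if_pos h2, if_pos h2]
          by_cases h3 : run = false
          · rw [if_pos h3, if_pos h3]
          · rw [if_neg h3, if_neg h3]
            exact ihn (i + 1) b (by omega) cnt i run
        · rw [if_neg h2, if_neg h2]
          exact ihn (i + 1) b (by omega) cnt t false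
    · rw [altScan, dif_neg h, PySem.List.pyRange_one_eq_nil (by omega)]
      rfl

lemma altScan_eq_list (i b : Int) (cnt : PySem.Dict Int Int) (t : Int) (run : Bool) :
    altScan i b cnt t run = altScanL (PySem.List.pyRange i b 1) cnt t run :=
  altScan_eq_list_aux (b - i).toNat i b le_rfl cnt t run

lemma count_pyRange (a b j : Int) :
    (PySem.List.pyRange a b 1).count j = if a ≤ j ∧ j < b then 1 else 0 := by
  split_ifs with h
  · exact List.count_eq_one_of_mem (PySem.List.nodup_pyRange_one a b)
      (PySem.List.mem_pyRange_one.mpr h)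
  · exact List.count_eq_zero.mpr (fun hm => h (PySem.List.mem_pyRange_one.mp hm))

-- ---- A-side scan lemmas ----

lemma scanA_count {rng arr arr' : List Int} (h : scanAList rng arr = some arr') :
    ∀ j, arr'.count j + rng.count j = arr.count j := by
  induction rng generalizing arr with
  | nil => simp only [scanAList, Option.some.injEq] at h; subst h; simp
  | cons i rest ih =>
    intro j
    simp only [scanAList] at h
    split at h
    case isTrue hi =>
      rw [PySem.List.remove?_eq_some_erase arr i hi] at h
      have := ih h j
      rcases eq_or_ne j i with rfl | hne
      · have hpos : 0 < arr.count j := List.count_pos_iff.mpr hi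
        rw [List.count_erase_self] at this
        simp only [List.count_cons, beq_self_eq_true, if_true]
        omega
      · rw [List.count_erase_of_ne hne] at this
        simp only [List.count_cons, beq_iff_eq, if_neg (Ne.symm hne)]
        omega
    case isFalse => exact absurd h (by simp)

lemma scanA_length {rng arr arr' : List Int} (h : scanAList rng arr = some arr') :
    arr'.length + rng.length = arr.length := by
  induction rng generalizing arr with
  | nil => simp only [scanAList, Option.some.injEq] at h; subst h; simp
  | cons i rest ih =>
    simp only [scanAList] at h
    split at h
    case isTrue hi =>
      rw [PySem.List.remove?_eq_some_erase arr i hi] at h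
      have := ih h
      have h1 := List.length_erase_of_mem hi
      have h2 : 0 < arr.length := List.length_pos_of_mem hi
      simp only [List.length_cons]
      omega
    case isFalse => exact absurd h (by simp)

lemma scanA_some {rng arr : List Int} (hnd : rng.Nodup) (hmem : ∀ i ∈ rng, i ∈ arr) :
    ∃ arr', scanAList rng arr = some arr' := by
  induction rng generalizing arr with
  | nil => exact ⟨arr, rfl⟩
  | cons i rest ih =>
    have hi : i ∈ arr := hmem i (by simp)
    simp only [scanAList, if_pos hi, PySem.List.remove?_eq_some_erase arr i hi]
    refine ih hnd.of_cons (fun j hj => ?_)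
    have hji : j ≠ i := fun e => (List.nodup_cons.mp hnd).1 (e ▸ hj)
    exact (List.mem_erase_of_ne hji).mpr (hmem j (List.mem_cons_of_mem _ hj))

-- ---- B-side scan lemmas ----

lemma altScan_false_of_ones (rng : List Int) (cnt : PySem.Dict Int Int) (t : Int)
    (hall : ∀ i ∈ rng, cnt.getD i 0 = 1) :
    altScanL rng cnt t false = some t := by
  induction rng with
  | nil => rfl
  | cons i rest ih =>
    have h1 : cnt.getD i 0 = 1 := hall i (by simp)
    simp only [altScanL]
    rw [if_neg (by omega), if_neg (by omega)]
    exact ih (fun j hj => hall j (List.mem_cons_of_mem _ hj))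

lemma altScan_false_some {rng : List Int} {cnt : PySem.Dict Int Int} {t t' : Int}
    (hnn : ∀ i, 0 ≤ cnt.getD i 0)
    (h : altScanL rng cnt t false = some t') :
    t' = t ∧ ∀ i ∈ rng, cnt.getD i 0 = 1 := by
  induction rng with
  | nil => simp only [altScanL, Option.some.injEq] at h; exact ⟨h.symm, by simp⟩
  | cons i rest ih =>
    have h0 := hnn i
    simp only [altScanL] at h
    by_cases h1 : cnt.getD i 0 = 1
    · rw [if_neg (by omega), if_neg (by omega)] at h
      obtain ⟨rfl, hall⟩ := ih h
      refine ⟨rfl, fun j hj => ?_⟩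
      rcases List.mem_cons.mp hj with rfl | hj
      · exact h1
      · exact hall j hj
    · by_cases hc : cnt.getD i 0 = 2
      · rw [if_neg (by omega), if_pos hc] at h
        exact absurd h (by simp)
      · rw [if_pos (by omega)] at h
        exact absurd h (by simp)

lemma altScan_true_of_shape_aux (cnt : PySem.Dict Int Int) :
    ∀ (n : Nat) (a b t : Int), (b - a).toNat ≤ n → a ≤ t + 1 → t < b →
    (∀ i : Int, a ≤ i → i ≤ t → cnt.getD i 0 = 2) →
    (∀ i : Int, t < i → i < b → cnt.getD i 0 = 1) →
    altScanL (PySem.List.pyRange a b 1) cnt (a - 1) true = some t := by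
  intro n
  induction n with
  | zero =>
    intro a b t hn h1 h2 _ _
    rw [PySem.List.pyRange_one_eq_nil (by omega)]
    simp only [altScanL, Option.some.injEq]
    omega
  | succ n ihn =>
    intro a b t hn h1 h2 hs2 hs1
    by_cases hab : b ≤ a
    · rw [PySem.List.pyRange_one_eq_nil hab]
      simp only [altScanL, Option.some.injEq]
      omega
    · replace hab : a < b := by omega
      rw [PySem.List.pyRange_one_cons hab]
      simp only [altScanL]
      rcases lt_or_ge t a with hta | hta
      · -- t = a - 1 : head count is 1, rest all ones
        have hca : cnt.getD a 0 = 1 := hs1 a (by omega) hab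
        rw [if_neg (by omega), if_neg (by omega)]
        have := altScan_false_of_ones (PySem.List.pyRange (a + 1) b 1) cnt (a - 1)
          (fun i hi => by
            have := PySem.List.mem_pyRange_one.mp hi
            exact hs1 i (by omega) (by omega))
        rw [this]
        congr 1
        omega
      · -- a ≤ t : head count is 2, recurse
        have hca : cnt.getD a 0 = 2 := hs2 a le_rfl hta
        rw [if_neg (by omega), if_pos hca, if_neg (by simp)]
        have := ihn (a + 1) b t (by omega) (by omega) h2
          (fun i hi hit => hs2 i (by omega) hit)
          (fun i hit hib => hs1 i hit hib)
        simpa using this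

lemma altScan_true_some_aux (cnt : PySem.Dict Int Int) (hnn : ∀ i, 0 ≤ cnt.getD i 0) :
    ∀ (n : Nat) (a b t : Int), (b - a).toNat ≤ n → a ≤ b →
    altScanL (PySem.List.pyRange a b 1) cnt (a - 1) true = some t →
    a - 1 ≤ t ∧ t < b ∧
    (∀ i : Int, a ≤ i → i ≤ t → cnt.getD i 0 = 2) ∧
    (∀ i : Int, t < i → i < b → cnt.getD i 0 = 1) := by
  intro n
  induction n with
  | zero =>
    intro a b t hn hab h
    have hba : b = a := by omega
    subst hba
    rw [PySem.List.pyRange_one_eq_nil le_rfl] at h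
    simp only [altScanL, Option.some.injEq] at h
    exact ⟨by omega, by omega, fun i hi hit => by omega, fun i hit hib => by omega⟩
  | succ n ihn =>
    intro a b t hn hab h
    rcases eq_or_lt_of_le hab with rfl | hab'
    · rw [PySem.List.pyRange_one_eq_nil le_rfl] at h
      simp only [altScanL, Option.some.injEq] at h
      exact ⟨by omega, by omega, fun i hi hit => by omega, fun i hit hib => by omega⟩
    · rw [PySem.List.pyRange_one_cons hab'] at h
      simp only [altScanL] at h
      have h0 := hnn a
      by_cases hca : cnt.getD a 0 = 2
      · rw [if_neg (by omega), if_pos hca, if_neg (by simp)] at h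
        have h' : altScanL (PySem.List.pyRange (a + 1) b 1) cnt ((a + 1) - 1) true = some t := by
          simpa using h
        obtain ⟨k1, k2, k3, k4⟩ := ihn (a + 1) b t (by omega) (by omega) h'
        refine ⟨by omega, k2, fun i hi hit => ?_, fun i hit hib => ?_⟩
        · rcases eq_or_lt_of_le hi with rfl | hi'
          · exact hca
          · exact k3 i (by omega) hit
        · exact k4 i hit hib
      · by_cases h1 : cnt.getD a 0 = 1
        · rw [if_neg (by omega), if_neg (by omega)] at h
          obtain ⟨rfl, hall⟩ := altScan_false_some hnn h
          refine ⟨by omega, by omega, fun i hi hit => by omega, fun i hit hib => ?_⟩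
          rcases eq_or_lt_of_le (show a ≤ i by omega) with rfl | hi'
          · exact h1
          · exact hall i (PySem.List.mem_pyRange_one.mpr ⟨by omega, hib⟩)
        · rw [if_pos (by omega)] at h
          exact absurd h (by simp)

-- ---- characterisations of the two programs ----

lemma A_of_good {N m t : Int} {arr : List Int}
    (hmax : PySem.List.max? arr (fun x => x) = some m) (hg : Good arr m t) :
    animal N arr = valOf m t := by
  obtain ⟨g1, g2, g3, g4, g5, g6⟩ := hg
  have hm0 : 0 ≤ m := by
    by_contra hm
    have := g5 m (by omega)
    exact absurd (List.count_pos_iff.mpr (PySem.List.max?_mem hmax)) (by omega)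
  -- phase 1 succeeds
  obtain ⟨arr2, h2⟩ : ∃ arr2, scanAList (PySem.List.pyRange 0 (m + 1) 1) arr = some arr2 := by
    refine scanA_some (PySem.List.nodup_pyRange_one 0 (m + 1)) (fun i hi => ?_)
    have hi' := PySem.List.mem_pyRange_one.mp hi
    refine List.count_pos_iff.mp ?_
    by_cases hit : i ≤ t
    · have := g3 i hi'.1 hit; omega
    · have := g4 i (by omega) (by omega); omega
  have hc2 := scanA_count h2
  have hc2' : ∀ j, arr2.count j = if 0 ≤ j ∧ j ≤ t then 1 else 0 := by
    intro j
    have h := hc2 j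
    rw [count_pyRange] at h
    by_cases hj0 : 0 ≤ j
    · by_cases hjt : j ≤ t
      · have := g3 j hj0 hjt; split_ifs at h ⊢ <;> omega
      · by_cases hjm : j ≤ m
        · have := g4 j (by omega) hjm; split_ifs at h ⊢ <;> omega
        · have := g6 j (by omega); split_ifs at h ⊢ <;> omega
    · have := g5 j (by omega); split_ifs at h ⊢ <;> omega
  unfold animal
  simp only [hmax]
  rw [animalScan_eq_list]
  simp only [h2]
  by_cases ht : t = -1
  · subst ht
    have he : arr2 = [] := by
      refine List.eq_nil_iff_forall_not_mem.mpr (fun x hx => ?_)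
      have := hc2' x
      have hpos := List.count_pos_iff.mpr hx
      split_ifs at this <;> omega
    rw [if_pos he]
    simp [valOf]
  · -- 0 ≤ t : arr2 = one copy of 0..t
    have ht0 : 0 ≤ t := by omega
    have hmem_t : t ∈ arr2 := by
      refine List.count_pos_iff.mp ?_
      have := hc2' t
      split_ifs at this <;> omega
    have hne : arr2 ≠ [] := List.ne_nil_of_mem hmem_t
    rw [if_neg hne]
    obtain ⟨m2, hmax2⟩ : ∃ m2, PySem.List.max? arr2 (fun x => x) = some m2 := by
      rcases hh : PySem.List.max? arr2 (fun x => x) with _ | m2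
      · exact absurd (PySem.List.max?_eq_none_iff arr2 (fun x => x) |>.mp hh) hne
      · exact ⟨m2, rfl⟩
    have hm2t : m2 = t := by
      have hmem2 := PySem.List.max?_mem hmax2
      have h1 : m2 ≤ t := by
        have := hc2' m2
        have hpos := List.count_pos_iff.mpr hmem2
        split_ifs at this <;> omega
      have h2' : t ≤ m2 := PySem.List.max?_isMax hmax2 t hmem_t
      omega
    rw [hm2t] at hmax2
    simp only [hmax2]
    rw [animalScan_eq_list]
    obtain ⟨arr3, h3⟩ : ∃ arr3, scanAList (PySem.List.pyRange 0 (t + 1) 1) arr2 = some arr3 := by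
      refine scanA_some (PySem.List.nodup_pyRange_one 0 (t + 1)) (fun i hi => ?_)
      have hi' := PySem.List.mem_pyRange_one.mp hi
      refine List.count_pos_iff.mp ?_
      have := hc2' i
      split_ifs at this <;> omega
    simp only [h3]
    have hc3 := scanA_count h3
    have he3 : arr3 = [] := by
      refine List.eq_nil_iff_forall_not_mem.mpr (fun x hx => ?_)
      have h := hc3 x
      rw [count_pyRange] at h
      have := hc2' x
      have hpos := List.count_pos_iff.mpr hx
      split_ifs at this h <;> omega
    rw [if_neg (by simp [he3])]
    unfold valOf
    rw [if_neg ht]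
    by_cases htm : t = m
    · rw [if_neg (by omega), if_pos htm]
    · rw [if_pos (by omega), if_neg htm]

lemma A_ne_zero {N m : Int} {arr : List Int}
    (hmax : PySem.List.max? arr (fun x => x) = some m) (hA : animal N arr ≠ 0) :
    ∃ t, Good arr m t ∧ (arr.length : Int) = (m + 1) + (t + 1) := by
  have hub : ∀ y ∈ arr, y ≤ m := fun y hy => PySem.List.max?_isMax hmax y hy
  have hhigh : ∀ j, m < j → arr.count j = 0 := fun j hj =>
    List.count_eq_zero.mpr (fun hm => by have := hub j hm; omega)
  have hne0 : arr ≠ [] := List.ne_nil_of_mem (PySem.List.max?_mem hmax)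
  unfold animal at hA
  simp only [hmax] at hA
  rw [animalScan_eq_list] at hA
  rcases h2 : scanAList (PySem.List.pyRange 0 (m + 1) 1) arr with _ | arr2
  · simp only [h2] at hA
    exact absurd rfl hA
  simp only [h2] at hA
  have hc2 := scanA_count h2
  have hl2 := scanA_length h2
  rw [PySem.List.length_pyRange_one] at hl2
  have hm0 : 0 ≤ m := by
    by_contra hm
    rw [PySem.List.pyRange_one_eq_nil (by omega)] at h2
    simp only [scanAList, Option.some.injEq] at h2
    subst h2
    rw [if_neg hne0] at hA
    simp only [hmax] at hA
    rw [animalScan_eq_list, PySem.List.pyRange_one_eq_nil (by omega : m + 1 ≤ (0:Int))] at hA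
    simp only [scanAList] at hA
    rw [if_pos hne0] at hA
    exact hA rfl
  by_cases he : arr2 = []
  · subst he
    refine ⟨-1, ⟨by omega, by omega, fun i h1 h2 => by omega,
      fun i h1 h2 => ?_, fun i h1 => ?_, hhigh⟩, ?_⟩
    · have h := hc2 i
      rw [count_pyRange, if_pos (by omega)] at h
      simpa using h.symm
    · have h := hc2 i
      rw [count_pyRange, if_neg (by omega)] at h
      simpa using h.symm
    · simp only [List.length_nil] at hl2
      omega
  · rw [if_neg he] at hA
    obtain ⟨m2, hmax2⟩ : ∃ m2, PySem.List.max? arr2 (fun x => x) = some m2 := by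
      rcases hh : PySem.List.max? arr2 (fun x => x) with _ | m2
      · exact absurd (PySem.List.max?_eq_none_iff arr2 (fun x => x) |>.mp hh) he
      · exact ⟨m2, rfl⟩
    simp only [hmax2] at hA
    rw [animalScan_eq_list] at hA
    rcases h3 : scanAList (PySem.List.pyRange 0 (m2 + 1) 1) arr2 with _ | arr3
    · simp only [h3] at hA
      exact absurd rfl hA
    simp only [h3] at hA
    by_cases he3 : arr3 = []
    · have hc3 := scanA_count h3
      have hl3 := scanA_length h3
      rw [PySem.List.length_pyRange_one] at hl3
      have hm20 : 0 ≤ m2 := by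
        by_contra hm2
        rw [PySem.List.pyRange_one_eq_nil (by omega)] at h3
        simp only [scanAList, Option.some.injEq] at h3
        exact he (h3.trans he3)
      subst he3
      have hc2' : ∀ j, (arr2.count j : Int) = if 0 ≤ j ∧ j ≤ m2 then 1 else 0 := by
        intro j
        have h := hc3 j
        rw [count_pyRange] at h
        simp only [List.count_nil] at h
        split_ifs at h ⊢ <;> omega
      have hm2m : m2 ≤ m := by
        by_contra hgt
        have hcm2 := hc2 m2
        rw [count_pyRange, if_neg (by omega)] at hcm2
        have := hc2' m2
        have := hhigh m2 (by omega)
        split_ifs at * <;> omega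
      refine ⟨m2, ⟨by omega, hm2m, fun i h1 h2 => ?_, fun i h1 h2 => ?_, fun i h1 => ?_, hhigh⟩, ?_⟩
      · have hc := hc2 i
        rw [count_pyRange, if_pos (by omega)] at hc
        have := hc2' i
        split_ifs at this <;> omega
      · have hc := hc2 i
        rw [count_pyRange, if_pos (by omega)] at hc
        have := hc2' i
        split_ifs at this <;> omega
      · have hc := hc2 i
        rw [count_pyRange, if_neg (by omega)] at hc
        have := hc2' i
        split_ifs at this <;> omega
      · simp only [List.length_nil] at hl3
        omega
    · rw [if_pos he3] at hA
      exact absurd rfl hA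

lemma B_of_good {N m t : Int} {arr : List Int}
    (hmax : PySem.List.max? arr (fun x => x) = some m) (hg : Good arr m t)
    (hlen : (arr.length : Int) = (m + 1) + (t + 1)) :
    animal_alt N arr = valOf m t := by
  obtain ⟨g1, g2, g3, g4, g5, g6⟩ := hg
  have hm0 : 0 ≤ m := by
    by_contra hm
    have := g5 m (by omega)
    exact absurd (List.count_pos_iff.mpr (PySem.List.max?_mem hmax)) (by omega)
  unfold animal_alt
  simp only [PySem.Dict.foldl_insert_getD_add_one_eq_counter, hmax]
  rw [if_neg (by omega), altScan_eq_list]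
  have hscan : altScanL (PySem.List.pyRange 0 (m + 1) 1) (PySem.Dict.counter arr) (-1) true = some t := by
    have := altScan_true_of_shape_aux (PySem.Dict.counter arr) (m + 1 - 0).toNat 0 (m + 1) t
      le_rfl (by omega) (by omega)
      (fun i h1 h2 => by rw [PySem.Dict.getD_counter]; rw [g3 i h1 h2]; rfl)
      (fun i h1 h2 => by rw [PySem.Dict.getD_counter]; rw [g4 i h1 (by omega)]; rfl)
    simpa using this
  rw [hscan]
  simp only
  rw [if_neg (by omega)]
  unfold valOf
  rfl

lemma B_ne_zero {N m : Int} {arr : List Int}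
    (hmax : PySem.List.max? arr (fun x => x) = some m) (hB : animal_alt N arr ≠ 0) :
    ∃ t, Good arr m t ∧ (arr.length : Int) = (m + 1) + (t + 1) := by
  have hub : ∀ y ∈ arr, y ≤ m := fun y hy => PySem.List.max?_isMax hmax y hy
  have hhigh : ∀ j, m < j → arr.count j = 0 := fun j hj =>
    List.count_eq_zero.mpr (fun hm => by have := hub j hm; omega)
  have hnn : ∀ i, 0 ≤ (PySem.Dict.counter arr).getD i 0 := fun i => by
    rw [PySem.Dict.getD_counter]; positivity
  unfold animal_alt at hB
  simp only [PySem.Dict.foldl_insert_getD_add_one_eq_counter, hmax] at hB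
  rw [altScan_eq_list] at hB
  by_cases hm0 : m < 0
  · rw [if_pos hm0] at hB
    exact absurd rfl hB
  rw [if_neg hm0] at hB
  rcases hscan : altScanL (PySem.List.pyRange 0 (m + 1) 1) (PySem.Dict.counter arr) (-1) true with _ | t
  · simp only [hscan] at hB
    exact absurd rfl hB
  simp only [hscan] at hB
  have hscan' : altScanL (PySem.List.pyRange 0 (m + 1) 1) (PySem.Dict.counter arr) (0 - 1) true = some t := by
    simpa using hscan
  obtain ⟨k1, k2, k3, k4⟩ := altScan_true_some_aux (PySem.Dict.counter arr) hnn
    (m + 1 - 0).toNat 0 (m + 1) t le_rfl (by omega) hscan'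
  have hk3 : ∀ i : Int, 0 ≤ i → i ≤ t → arr.count i = 2 := fun i h1 h2 => by
    have := k3 i h1 h2
    rw [PySem.Dict.getD_counter] at this
    exact_mod_cast this
  have hk4 : ∀ i : Int, t < i → i ≤ m → arr.count i = 1 := fun i h1 h2 => by
    have := k4 i h1 (by omega)
    rw [PySem.Dict.getD_counter] at this
    exact_mod_cast this
  have hlen : (arr.length : Int) = (m + 1) + (t + 1) := by
    by_contra hl
    rw [if_pos (by exact_mod_cast hl)] at hB
    exact hB rfl
  -- the multiset [0..t] ++ [0..m] fills arr exactly, so arr has no other elements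
  have hperm : (PySem.List.pyRange 0 (t + 1) 1 ++ PySem.List.pyRange 0 (m + 1) 1).Perm arr := by
    have hsub : (PySem.List.pyRange 0 (t + 1) 1 ++ PySem.List.pyRange 0 (m + 1) 1).Subperm arr := by
      refine List.subperm_ext_iff.mpr (fun x hx => ?_)
      have hx' : 0 ≤ x ∧ x < m + 1 := by
        rcases List.mem_append.mp hx with hx1 | hx1 <;>
          { have := PySem.List.mem_pyRange_one.mp hx1; omega }
      rw [List.count_append, count_pyRange, count_pyRange]
      by_cases hxt : x ≤ t
      · rw [if_pos (by omega), if_pos (by omega), hk3 x hx'.1 hxt]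
      · rw [if_neg (by omega), if_pos (by omega), hk4 x (by omega) (by omega)]
    refine hsub.perm_of_length_le ?_
    rw [List.length_append, PySem.List.length_pyRange_one, PySem.List.length_pyRange_one]
    omega
  have hcount : ∀ j, arr.count j = (PySem.List.pyRange 0 (t + 1) 1 ++ PySem.List.pyRange 0 (m + 1) 1).count j :=
    fun j => (hperm.count j).symm
  refine ⟨t, ⟨by omega, by omega, hk3, hk4, fun i h1 => ?_, hhigh⟩, hlen⟩
  rw [hcount i, List.count_append, count_pyRange, count_pyRange,
    if_neg (by omega), if_neg (by omega)]

lemma valOf_ne_zero (m t : Int) : valOf m t ≠ 0 := by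
  unfold valOf
  split_ifs <;> positivity

-- ===== VERDICT (by name: the statement is the Claim_ definition above) =====
theorem animal_spec : Claim_equal_animal := by
  intro N arr _ hpre
  unfold Spec_animal
  obtain ⟨m, hmax⟩ : ∃ m, PySem.List.max? arr (fun x => x) = some m := by
    rcases h : PySem.List.max? arr (fun x => x) with _ | m
    · exact absurd (PySem.List.max?_eq_none_iff arr (fun x => x) |>.mp h) hpre
    · exact ⟨m, rfl⟩
  by_cases hA : animal N arr = 0
  · by_cases hB : animal_alt N arr = 0
    · rw [hA, hB]
    · obtain ⟨t, hg, hlen⟩ := B_ne_zero hmax hB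
      exact absurd (A_of_good (N := N) hmax hg) (by rw [hA]; exact fun h => valOf_ne_zero m t h.symm)
  · obtain ⟨t, hg, hlen⟩ := A_ne_zero hmax hA
    rw [A_of_good (N := N) hmax hg, B_of_good (N := N) hmax hg hlen]
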